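-- pv_equiv track=rewrite | github.com/matthewninja/cap1-tech-assassment | code_check/__init__.py | has_single_line_comment
-- ===== SOURCE A (Python) =====
-- def has_single_line_comment(line):
--   in_string_single = False
--   in_string_double = False
--   escaped = False
--   for c in line:
--     if in_string_double or in_string_single: # escaped character doesn't count for anything
--       if c == '\\':
--         escaped = True
--         continue
--     if not escaped and c == '\'' and not in_string_double: # enter/exit a string with single quote
--       in_string_single = not in_string_single
--     elif not escaped and c == '"' and not in_string_single: # enter/exit a string with double quote
--       in_string_double = not in_string_double
--
--     escaped = False
--     if c == '#' and not in_string_double and not in_string_single: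
--       return True
--
--   return False
-- ===== SOURCE B (Python) =====
-- def has_single_line_comment(line):
--     i, n = 0, len(line)
--     while i < n:
--         c = line[i]
--         if c == '#':
--             return True
--         if c == "'" or c == '"':
--             # skip the whole string literal: stop at the same quote whose
--             # preceding char is not a backslash (naive escape rule), or at EOL
--             i += 1
--             while i < n and not (line[i] == c and line[i - 1] != '\\'):
--                 i += 1
--         i += 1
--     return False
-- ===== Notes on version B (the rewrite author's own statement) =====
-- stated objective: alternative
-- what changed: Replaces the per-character flag state machine (in_string_single/in_string_double/escaped) with an index-driven scanner that, on meeting a quote, skips the whole string literal in an inner loop which stops at a matching quote not immediately preceded by a backslash, keeping no persistent state flags.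
import Mathlib
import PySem

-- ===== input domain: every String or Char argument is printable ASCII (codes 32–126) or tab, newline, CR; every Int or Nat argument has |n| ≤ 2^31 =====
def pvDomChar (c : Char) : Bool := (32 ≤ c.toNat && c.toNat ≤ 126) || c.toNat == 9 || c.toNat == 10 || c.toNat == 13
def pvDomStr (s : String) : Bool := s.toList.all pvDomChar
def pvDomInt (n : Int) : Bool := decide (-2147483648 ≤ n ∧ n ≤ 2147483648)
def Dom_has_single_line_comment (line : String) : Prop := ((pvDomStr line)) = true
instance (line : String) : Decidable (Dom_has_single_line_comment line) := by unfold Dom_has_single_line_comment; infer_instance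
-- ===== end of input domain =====

-- B replaces A's flag-based state machine by an index scanner that skips whole
-- string literals in an inner loop (alternative decomposition, same cost).

-- ===== PORT A =====
-- A's for-loop with state (in_string_single, in_string_double, escaped); early
-- `return True` becomes returning `true` from the recursion.
def hslcA : List Char → Bool → Bool → Bool → Bool
  | [], _, _, _ => false
  | c :: rest, inS, inD, esc =>
    if (inD || inS) && c == '\\' then
      -- escaped = True; continue
      hslcA rest inS inD true
    else
      let st :=
        if !esc && c == '\'' && !inD then (!inS, inD)
        else if !esc && c == '"' && !inS then (inS, !inD)
        else (inS, inD)
      if c == '#' && !st.2 && !st.1 then true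
      else hslcA rest st.1 st.2 false

def has_single_line_comment (line : String) : Bool :=
  hslcA line.toList false false false

-- ===== PORT B =====
-- Source B's inner while loop: advance i until line[i] == q with line[i-1] != '\\', or EOL.
def skipStrB (cs : List Char) (q : Char) (i : Nat) : Nat :=
  if i < cs.length ∧ ¬ (cs.getD i ' ' == q && cs.getD (i - 1) ' ' != '\\') then
    skipStrB cs q (i + 1)
  else i
termination_by cs.length - i

theorem skipStrB_ge (cs : List Char) (q : Char) (i : Nat) : i ≤ skipStrB cs q i := by
  unfold skipStrB
  split
  · exact le_trans (Nat.le_succ i) (skipStrB_ge cs q (i + 1))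
  · exact le_refl i
termination_by cs.length - i

-- Source B's outer while loop over index i.
def scanB (cs : List Char) (i : Nat) : Bool :=
  if h : i < cs.length then
    let c := cs.getD i ' '
    if c == '#' then true
    else if c == '\'' || c == '"' then
      scanB cs (skipStrB cs c (i + 1) + 1)
    else scanB cs (i + 1)
  else false
termination_by cs.length - i
decreasing_by
  · have := skipStrB_ge cs (cs.getD i ' ') (i + 1); omega
  · omega

def has_single_line_comment_alt (line : String) : Bool :=
  scanB line.toList 0

-- ===== PRECONDITION & SPEC =====
def Spec_has_single_line_comment (line : String) (out : Bool) : Prop := out = has_single_line_comment_alt line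
instance (line : String) (out : Bool) : Decidable (Spec_has_single_line_comment line out) := by unfold Spec_has_single_line_comment; infer_instance

-- ===== CLAIM (what is proved, stated in full; the proofs are below) =====
def Claim_equal_has_single_line_comment : Prop := ∀ (line : String), Dom_has_single_line_comment line → Spec_has_single_line_comment line (has_single_line_comment line)

-- ===== LEMMAS AND PROOFS =====

-- A's machine on the char that opens a string literal.
theorem openA (q : Char) (rest : List Char) (hq : q = '\'' ∨ q = '"') :
    hslcA (q :: rest) false false false = hslcA rest (q == '\'') (q == '"') false := by
  rcases hq with h | h <;> subst h <;> simp [hslcA]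

-- A's machine on one char while inside a string opened by quote q.
theorem inA (q c : Char) (rest : List Char) (hq : q = '\'' ∨ q = '"') (esc : Bool) :
    hslcA (c :: rest) (q == '\'') (q == '"') esc =
      if c = '\\' then hslcA rest (q == '\'') (q == '"') true
      else if esc = false ∧ c = q then hslcA rest false false false
      else hslcA rest (q == '\'') (q == '"') false := by
  rcases hq with h | h <;> subst h <;>
    (by_cases h1 : c = '\\' <;> [skip; by_cases h2 : c = '\''] <;>
     [skip; skip; by_cases h3 : c = '"'] <;> cases esc <;>
     simp_all [hslcA])

-- Combined invariant, by strong induction on cs.length - i: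
--  P: outside any string, scanB at i equals A's machine on the suffix with all-false state.
--  Q: inside a string opened by quote q, A's machine on the suffix (with escaped =
--     "previous char is a backslash") equals B continuing after the inner skip loop.
theorem mainInv (cs : List Char) (m : Nat) :
    ∀ i, cs.length - i ≤ m →
      (scanB cs i = hslcA (cs.drop i) false false false) ∧
      (∀ q, (q = '\'' ∨ q = '"') →
        hslcA (cs.drop i) (q == '\'') (q == '"') (cs.getD (i - 1) ' ' == '\\')
          = scanB cs (skipStrB cs q i + 1)) := by
  induction m with
  | zero =>
    intro i hi
    have hlen : cs.length ≤ i := by omega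
    have hdrop : cs.drop i = [] := List.drop_eq_nil_of_le hlen
    refine ⟨?_, ?_⟩
    · rw [scanB, hdrop]; simp [hslcA, Nat.not_lt.mpr hlen]
    · intro q _
      rw [hdrop, skipStrB, scanB]
      simp [hslcA, Nat.not_lt.mpr hlen]
      omega
  | succ m ih =>
    intro i hi
    by_cases hlt : i < cs.length
    · have hdrop : cs.drop i = cs[i] :: cs.drop (i + 1) :=
        List.drop_eq_getElem_cons hlt
      have hgd : cs.getD i ' ' = cs[i] := List.getD_eq_getElem cs ' ' hlt
      have hm : cs.length - (i + 1) ≤ m := by omega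
      have hprev : (i + 1) - 1 = i := by omega
      refine ⟨?_, ?_⟩
      · -- P i
        rw [scanB, dif_pos hlt, hdrop]
        by_cases hsh : cs[i] = '#'
        · simp only [hgd, hsh]
          simp [hslcA]
        · by_cases hq : cs[i] = '\'' ∨ cs[i] = '"'
          · have hQ := (ih (i + 1) hm).2 cs[i] hq
            rw [hprev, hgd] at hQ
            have hesc : (cs[i] == '\\') = false := by
              rcases hq with h | h <;> simp [h]
            rw [hesc] at hQ
            have hlhs : (cs[i] == '#') = false := by simp [hsh]
            have hq2 : (cs[i] == '\'' || cs[i] == '"') = true := by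
              rcases hq with h | h <;> simp [h]
            simp only [hgd, hlhs, Bool.false_eq_true, if_false, hq2, if_true]
            rw [openA cs[i] _ hq, hQ]
          · push_neg at hq
            have hP := (ih (i + 1) hm).1
            have hlhs : (cs[i] == '#') = false := by simp [hsh]
            have hq2 : (cs[i] == '\'' || cs[i] == '"') = false := by
              simp [hq.1, hq.2]
            simp only [hgd, hlhs, Bool.false_eq_true, if_false, hq2, hP]
            simp [hslcA, hsh, hq.1, hq.2]
      · -- Q i
        intro q hqq
        rw [hdrop, inA q cs[i] _ hqq]
        by_cases hbs : cs[i] = '\\'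
        · -- backslash inside the string: A sets escaped, B's inner loop advances
          have hnq : ¬ ((cs.getD i ' ' == q && cs.getD (i - 1) ' ' != '\\') = true) := by
            have hne : cs[i] ≠ q := by
              rcases hqq with h | h <;> subst h <;> simp [hbs]
            rw [Bool.and_eq_true, beq_iff_eq, hgd]
            rintro ⟨h1, _⟩
            exact hne h1
          have hsk : skipStrB cs q i = skipStrB cs q (i + 1) := by
            rw [skipStrB]; exact if_pos ⟨hlt, hnq⟩
          rw [hsk, if_pos hbs]
          have hQ := (ih (i + 1) hm).2 q hqq
          rw [hprev, hgd, hbs] at hQ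
          simpa using hQ
        · by_cases hcl : (cs.getD (i - 1) ' ' == '\\') = false ∧ cs[i] = q
          · -- unescaped closing quote: A leaves the string, B's inner loop stops at i
            have hb : (cs.getD i ' ' == q && cs.getD (i - 1) ' ' != '\\') = true := by
              rw [Bool.and_eq_true, beq_iff_eq, bne_iff_ne]
              refine ⟨by rw [hgd, hcl.2], ?_⟩
              have := hcl.1
              simpa using this
            have hsk : skipStrB cs q i = i := by
              rw [skipStrB]; exact if_neg (fun h => h.2 hb)
            rw [hsk, if_neg hbs, if_pos hcl]
            exact ((ih (i + 1) hm).1).symm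
          · -- ordinary char (or escaped quote) inside the string
            have hnq : ¬ ((cs.getD i ' ' == q && cs.getD (i - 1) ' ' != '\\') = true) := by
              rw [Bool.and_eq_true, beq_iff_eq, bne_iff_ne, hgd]
              rintro ⟨h1, h2⟩
              exact hcl ⟨by simpa using h2, h1⟩
            have hsk : skipStrB cs q i = skipStrB cs q (i + 1) := by
              rw [skipStrB]; exact if_pos ⟨hlt, hnq⟩
            rw [hsk, if_neg hbs, if_neg hcl]
            have hQ := (ih (i + 1) hm).2 q hqq
            rw [hprev, hgd] at hQ
            have hesc : (cs[i] == '\\') = false := by simp [hbs]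
            rw [hesc] at hQ
            exact hQ
    · have hlen : cs.length ≤ i := by omega
      have hdrop : cs.drop i = [] := List.drop_eq_nil_of_le hlen
      refine ⟨?_, ?_⟩
      · rw [scanB, hdrop]; simp [hslcA, Nat.not_lt.mpr hlen]
      · intro q _
        rw [hdrop, skipStrB, scanB]
        simp [hslcA, Nat.not_lt.mpr hlen]
        omega

-- ===== VERDICT (by name: the statement is the Claim_ definition above) =====
theorem has_single_line_comment_spec : Claim_equal_has_single_line_comment := by
  intro line _
  unfold Spec_has_single_line_comment has_single_line_comment has_single_line_comment_alt
  exact ((mainInv line.toList line.toList.length 0 (by omega)).1).symm
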